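-- pv_equiv track=rewrite | github.com/nickromney/platform | apps/subnet-calculator/apim-simulator/app/policy.py | _vary_values
-- ===== SOURCE A (Python) =====
-- def _vary_values(values: list[str]) -> list[str]:
--     out: list[str] = []
--     for item in values:
--         for part in item.split(";"):
--             value = part.strip()
--             if value:
--                 out.append(value)
--     return out
-- ===== SOURCE B (Python) =====
-- def _vary_values(values: list[str]) -> list[str]:
--     # Character-level state machine: build each stripped token directly,
--     # flushing on ';' and at end of each item; no split()/strip() calls.
--     out: list[str] = []
--     for item in values:
--         tok: list[str] = []   # current token, left-stripped, right-stripped so far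
--         pend: list[str] = []  # whitespace seen since the last token character
--         for ch in item:
--             if ch == ";":
--                 if tok:
--                     out.append("".join(tok))
--                 tok = []
--                 pend = []
--             elif ch.isspace():
--                 if tok:
--                     pend.append(ch)
--             else:
--                 tok.extend(pend)
--                 pend = []
--                 tok.append(ch)
--         if tok:
--             out.append("".join(tok))
--     return out
-- ===== Notes on version B (the rewrite author's own statement) =====
-- stated objective: alternative
-- what changed: B replaces A's split-then-strip-then-filter pipeline with a single character-level state machine that scans each string once, building the stripped tokens directly (pending-whitespace buffer) and flushing on ';' and at end of item; no split() or strip() calls.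
import Mathlib
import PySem

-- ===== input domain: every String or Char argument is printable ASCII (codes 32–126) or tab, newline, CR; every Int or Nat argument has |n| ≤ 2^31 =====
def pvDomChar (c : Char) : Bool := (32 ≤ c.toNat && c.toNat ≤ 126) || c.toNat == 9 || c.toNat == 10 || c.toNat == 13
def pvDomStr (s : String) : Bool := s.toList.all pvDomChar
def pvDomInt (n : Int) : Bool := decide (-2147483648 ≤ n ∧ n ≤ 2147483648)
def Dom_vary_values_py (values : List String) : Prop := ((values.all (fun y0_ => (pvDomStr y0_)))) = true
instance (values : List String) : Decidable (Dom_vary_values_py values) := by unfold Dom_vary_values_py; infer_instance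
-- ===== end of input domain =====

-- B replaces A's split/strip pipeline by a single character-level state machine that builds
-- the stripped tokens directly (alternative decomposition, same cost).

-- ===== PORT A =====
-- A: for item in values: for part in item.split(";"): value = part.strip(); if value: out.append(value)
-- (.getD [] only totalises split?; the separator ";" is non-empty so split? is always `some`)
def vary_values_py (values : List String) : List String :=
  values.foldl (fun out item =>
    ((PySem.Str.split? item ";").getD []).foldl (fun out part =>
      let value := PySem.Str.strip part
      if value ≠ "" then out ++ [value] else out) out) []

-- ===== PORT B =====
-- B: per item, scan its characters with state (tok, pend); ';' flushes the token,
-- whitespace is buffered in pend (only while a token is open), any other char commits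
-- pend and extends tok; end of item flushes.  python's tok/pend are lists of 1-char
-- strings and "".join(tok) builds the token: ported as List Char with String.ofList.
def vary_values_py_alt (values : List String) : List String :=
  values.foldl (fun out item =>
    let st := item.toList.foldl
      (fun (s : List String × List Char × List Char) ch =>
        let out := s.1
        let tok := s.2.1
        let pend := s.2.2
        if ch = ';' then
          (if tok ≠ [] then out ++ [String.ofList tok] else out, [], [])
        else if PySem.Chars.isspace ch then
          (out, tok, if tok ≠ [] then pend ++ [ch] else pend)
        else
          (out, tok ++ pend ++ [ch], []))
      (out, ([] : List Char), ([] : List Char))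
    if st.2.1 ≠ [] then st.1 ++ [String.ofList st.2.1] else st.1) []

-- ===== PRECONDITION & SPEC =====
def Spec_vary_values_py (values : List String) (out : List String) : Prop := out = vary_values_py_alt values
instance (values : List String) (out : List String) : Decidable (Spec_vary_values_py values out) := by unfold Spec_vary_values_py; infer_instance

-- ===== CLAIM (what is proved, stated in full; the proofs are below) =====
def Claim_equal_vary_values_py : Prop := ∀ (values : List String), Dom_vary_values_py values → Spec_vary_values_py values (vary_values_py values)

-- ===== LEMMAS AND PROOFS =====

-- proof-only reference model of s.split(";") at the character level
def mySplit : List Char → List (List Char)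
  | [] => [[]]
  | c :: rest => if c = ';' then [] :: mySplit rest else (mySplit rest).modifyHead (c :: ·)

theorem mySplit_ne_nil (cs : List Char) : mySplit cs ≠ [] := by
  induction cs with
  | nil => simp [mySplit]
  | cons c rest ih =>
    simp only [mySplit]
    split_ifs <;> simp_all [List.modifyHead]
    cases h : mySplit rest <;> simp_all

theorem go_eq_mySplit (fuel : Nat) (l cur : List Char) (acc : List (List Char))
    (hf : l.length ≤ fuel) :
    PySem.Chars.splitOn.go [';'] fuel l cur acc
      = acc.reverse ++ (mySplit l).modifyHead (cur.reverse ++ ·) := by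
  induction fuel generalizing l cur acc with
  | zero =>
    interval_cases hl : l.length
    cases l with
    | nil => simp [PySem.Chars.splitOn.go, mySplit]
    | cons c r => simp at hl
  | succ fuel ih =>
    cases l with
    | nil => simp [PySem.Chars.splitOn.go, mySplit]
    | cons c rest =>
      simp only [PySem.Chars.splitOn.go]
      by_cases hc : c = ';'
      · subst hc
        rw [if_pos (by simp)]
        rw [ih _ _ _ (by simpa using Nat.le_of_succ_le_succ hf)]
        simp [mySplit]
        cases mySplit rest <;> simp [List.modifyHead]
      · rw [if_neg (by simp [List.isPrefixOf, Ne.symm hc])]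
        rw [ih _ _ _ (by simpa using Nat.le_of_succ_le_succ hf)]
        simp only [mySplit, if_neg hc]
        obtain ⟨h, t, hht⟩ : ∃ h t, mySplit rest = h :: t := by
          cases hm : mySplit rest with
          | nil => exact absurd hm (mySplit_ne_nil rest)
          | cons h t => exact ⟨h, t, rfl⟩
        simp [hht, List.modifyHead]

theorem splitOn_eq_mySplit (cs : List Char) :
    PySem.Chars.splitOn cs [';'] = mySplit cs := by
  rw [PySem.Chars.splitOn, go_eq_mySplit _ _ _ _ (by omega)]
  cases h : mySplit cs with
  | nil => exact absurd h (mySplit_ne_nil cs)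
  | cons a t => simp [List.modifyHead]

-- one entry of the shared "strip, keep if non-empty" step, at String level (A-side)
def pvPiece (p : String) : Option String :=
  let v := PySem.Str.strip p
  if v ≠ "" then some v else none

theorem inner_loop_eq (parts : List String) (out : List String) :
    parts.foldl (fun out part =>
      let value := PySem.Str.strip part
      if value ≠ "" then out ++ [value] else out) out
    = out ++ parts.filterMap pvPiece := by
  induction parts generalizing out with
  | nil => simp
  | cons p ps ih =>
    simp only [List.foldl_cons, List.filterMap_cons, ih, pvPiece]
    by_cases h : PySem.Str.strip p ≠ "" <;> simp [h]

def strSplit (s : String) : List String := (PySem.Str.split? s ";").getD []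

theorem strSplit_eq (s : String) :
    strSplit s = (mySplit s.toList).map String.ofList := by
  simp [strSplit, PySem.Str.split?, PySem.Chars.split?, splitOn_eq_mySplit]

theorem outer_loop_eq (values : List String) (out : List String) :
    values.foldl (fun out item =>
      (strSplit item).foldl (fun out part =>
        let value := PySem.Str.strip part
        if value ≠ "" then out ++ [value] else out) out) out
    = out ++ (values.flatMap strSplit).filterMap pvPiece := by
  induction values generalizing out with
  | nil => simp
  | cons v vs ih => rw [List.foldl_cons, inner_loop_eq, ih]; simp

-- ---------- B-side: the state machine ----------

-- proof-side name for B's inner fold step (definitionally the port's lambda)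
def stepB (s : List String × List Char × List Char) (ch : Char) :
    List String × List Char × List Char :=
  let out := s.1
  let tok := s.2.1
  let pend := s.2.2
  if ch = ';' then
    (if tok ≠ [] then out ++ [String.ofList tok] else out, [], [])
  else if PySem.Chars.isspace ch then
    (out, tok, if tok ≠ [] then pend ++ [ch] else pend)
  else
    (out, tok ++ pend ++ [ch], [])

-- recursion form of B's inner foldl-plus-final-flush
def scanGo : List Char → List String → List Char → List Char → List String
  | [], out, tok, _ => if tok ≠ [] then out ++ [String.ofList tok] else out
  | c :: cs, out, tok, pend =>
    if c = ';' then
      scanGo cs (if tok ≠ [] then out ++ [String.ofList tok] else out) [] []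
    else if PySem.Chars.isspace c then
      scanGo cs out tok (if tok ≠ [] then pend ++ [c] else pend)
    else
      scanGo cs out (tok ++ pend ++ [c]) []

theorem foldl_eq_scanGo (cs : List Char) (out : List String) (tok pend : List Char) :
    (if (cs.foldl stepB (out, tok, pend)).2.1 ≠ [] then
       (cs.foldl stepB (out, tok, pend)).1 ++ [String.ofList (cs.foldl stepB (out, tok, pend)).2.1]
     else (cs.foldl stepB (out, tok, pend)).1)
    = scanGo cs out tok pend := by
  induction cs generalizing out tok pend with
  | nil => simp [scanGo]
  | cons c cs ih =>
    by_cases hc : c = ';'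
    · simp only [List.foldl_cons, stepB, if_pos hc, scanGo, ← ih]
    · by_cases hsp : PySem.Chars.isspace c
      · simp only [List.foldl_cons, stepB, if_neg hc, if_pos hsp, scanGo, ← ih]
      · simp only [List.foldl_cons, stepB, if_neg hc, if_neg hsp, scanGo, ← ih]

-- the value of the current token at the end of the current segment, given state (tok, pend)
def segTok : List Char → List Char → List Char → List Char
  | [], tok, _ => tok
  | c :: s, tok, pend =>
    if PySem.Chars.isspace c then segTok s tok (if tok ≠ [] then pend ++ [c] else pend)
    else segTok s (tok ++ pend ++ [c]) []

-- append a token if non-empty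
def optTok (v : List Char) : List String := if v ≠ [] then [String.ofList v] else []

-- Chars-level piece: strip, keep if non-empty
def pieceSeg (seg : List Char) : Option String :=
  if PySem.Chars.strip seg ≠ [] then some (String.ofList (PySem.Chars.strip seg)) else none

-- trailing part of segTok once the token is open: pend then the rest right-stripped
def kTail (pend : List Char) : List Char → List Char
  | [] => []
  | c :: s => if PySem.Chars.isspace c then kTail (pend ++ [c]) s else pend ++ c :: kTail [] s

theorem segTok_ne (s : List Char) (tok pend : List Char) (h : tok ≠ []) :
    segTok s tok pend = tok ++ kTail pend s := by
  induction s generalizing tok pend with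
  | nil => simp [segTok, kTail]
  | cons c s ih =>
    simp only [segTok, kTail]
    by_cases hc : PySem.Chars.isspace c
    · simp [hc, if_pos h, ih _ _ h]
    · rw [if_neg hc, if_neg hc, ih _ _ (by simp)]
      simp

theorem rstrip_cons (c : Char) (s : List Char) :
    PySem.Chars.rstrip (c :: s)
      = if s.all PySem.Chars.isspace then (if PySem.Chars.isspace c then [] else [c])
        else c :: PySem.Chars.rstrip s := by
  by_cases hall : s.all PySem.Chars.isspace
  · have hd : List.dropWhile PySem.Chars.isspace s.reverse = [] := by
      rw [List.dropWhile_eq_nil_iff]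
      intro x hx
      exact (List.all_eq_true.mp hall) x (List.mem_reverse.mp hx)
    simp [PySem.Chars.rstrip, List.dropWhile_append, hd, List.dropWhile]
    split_ifs <;> simp_all
  · have hd : List.dropWhile PySem.Chars.isspace s.reverse ≠ [] := by
      intro hcon
      apply hall
      rw [List.all_eq_true]
      intro x hx
      exact List.dropWhile_eq_nil_iff.mp hcon x (List.mem_reverse.mpr hx)
    simp [PySem.Chars.rstrip, List.dropWhile_append, List.isEmpty_iff, hd, hall]

theorem kTail_eq (s : List Char) (pend : List Char) :
    kTail pend s
      = if s.all PySem.Chars.isspace then [] else pend ++ PySem.Chars.rstrip s := by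
  induction s generalizing pend with
  | nil => simp [kTail]
  | cons c s ih =>
    simp only [kTail]
    by_cases hc : PySem.Chars.isspace c
    · rw [if_pos hc, ih]
      by_cases hall : s.all PySem.Chars.isspace
      · simp [hall, hc]
      · simp [hall, hc, rstrip_cons]
    · rw [if_neg hc, ih]
      have hall : ¬ (c :: s).all PySem.Chars.isspace := by simp [hc]
      by_cases h2 : s.all PySem.Chars.isspace
      · simp [hall, h2, rstrip_cons, hc]
      · simp [hall, h2, rstrip_cons]

theorem segTok_nil_nil (seg : List Char) :
    segTok seg [] [] = PySem.Chars.strip seg := by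
  induction seg with
  | nil => simp [segTok, PySem.Chars.strip, PySem.Chars.lstrip, PySem.Chars.rstrip]
  | cons c s ih =>
    by_cases hc : PySem.Chars.isspace c
    · simp only [segTok, if_pos hc]
      have hpend : (if ([] : List Char) ≠ [] then ([] : List Char) ++ [c] else []) = [] := by simp
      rw [hpend, ih]
      simp [PySem.Chars.strip, PySem.Chars.lstrip, List.dropWhile, hc]
    · simp only [segTok, if_neg hc]
      rw [segTok_ne _ _ _ (by simp), kTail_eq]
      simp only [PySem.Chars.strip, PySem.Chars.lstrip, List.dropWhile, hc]
      rw [rstrip_cons]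
      by_cases h2 : s.all PySem.Chars.isspace <;> simp [h2, hc]

theorem scanGo_main (cs : List Char) (out : List String) (tok pend : List Char)
    (seg : List Char) (rest : List (List Char)) (h : mySplit cs = seg :: rest) :
    scanGo cs out tok pend
      = out ++ optTok (segTok seg tok pend) ++ rest.filterMap pieceSeg := by
  induction cs generalizing out tok pend seg rest with
  | nil =>
    simp only [mySplit] at h
    obtain ⟨hseg, hrest⟩ := List.cons.inj h
    subst hseg; subst hrest
    simp only [scanGo, segTok, optTok, List.filterMap_nil, List.append_nil]
    split_ifs <;> simp
  | cons c cs ih =>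
    obtain ⟨h', t', hht⟩ : ∃ h' t', mySplit cs = h' :: t' := by
      cases hm : mySplit cs with
      | nil => exact absurd hm (mySplit_ne_nil cs)
      | cons a t => exact ⟨a, t, rfl⟩
    by_cases hc : c = ';'
    · subst hc
      rw [show mySplit (';' :: cs) = [] :: mySplit cs from by simp [mySplit]] at h
      obtain ⟨hseg, hrest⟩ := List.cons.inj h
      subst hseg; subst hrest
      rw [show scanGo (';' :: cs) out tok pend
            = scanGo cs (if tok ≠ [] then out ++ [String.ofList tok] else out) [] []
          from by simp [scanGo]]
      rw [ih _ _ _ _ _ hht]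
      have hflush : (if tok ≠ [] then out ++ [String.ofList tok] else out) = out ++ optTok tok := by
        simp only [optTok]; split_ifs <;> simp
      rw [hflush, segTok_nil_nil]
      rw [show segTok [] tok pend = tok from rfl]
      rw [hht]
      simp only [List.filterMap_cons, pieceSeg, optTok]
      by_cases hs : PySem.Chars.strip h' ≠ [] <;> simp [hs]
    · rw [show mySplit (c :: cs) = (mySplit cs).modifyHead (c :: ·) from by
          simp [mySplit, hc]] at h
      rw [hht, List.modifyHead] at h
      obtain ⟨hseg, hrest⟩ := List.cons.inj h
      subst hseg; subst hrest
      by_cases hsp : PySem.Chars.isspace c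
      · rw [show scanGo (c :: cs) out tok pend
              = scanGo cs out tok (if tok ≠ [] then pend ++ [c] else pend)
            from by simp [scanGo, hc, hsp]]
        rw [ih _ _ _ _ _ hht]
        rw [show segTok (c :: h') tok pend
              = segTok h' tok (if tok ≠ [] then pend ++ [c] else pend)
            from by simp [segTok, hsp]]
      · rw [show scanGo (c :: cs) out tok pend = scanGo cs out (tok ++ pend ++ [c]) []
            from by simp [scanGo, hc, hsp]]
        rw [ih _ _ _ _ _ hht]
        rw [show segTok (c :: h') tok pend = segTok h' (tok ++ pend ++ [c]) []
            from by simp [segTok, hsp]]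

-- the per-item result of B
def perItem (item : String) : List String := (mySplit item.toList).filterMap pieceSeg

theorem scanGo_item (item : String) (out : List String) :
    scanGo item.toList out [] [] = out ++ perItem item := by
  obtain ⟨h', t', hht⟩ : ∃ h' t', mySplit item.toList = h' :: t' := by
    cases hm : mySplit item.toList with
    | nil => exact absurd hm (mySplit_ne_nil _)
    | cons a t => exact ⟨a, t, rfl⟩
  rw [scanGo_main _ _ _ _ _ _ hht, perItem, hht]
  rw [show segTok h' [] [] = PySem.Chars.strip h' from segTok_nil_nil h']
  simp only [List.filterMap_cons, pieceSeg, optTok]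
  by_cases hs : PySem.Chars.strip h' ≠ [] <;> simp [hs]

theorem altB (values : List String) (out : List String) :
    values.foldl (fun out item =>
      let st := item.toList.foldl stepB (out, ([] : List Char), ([] : List Char))
      if st.2.1 ≠ [] then st.1 ++ [String.ofList st.2.1] else st.1) out
    = out ++ values.flatMap perItem := by
  induction values generalizing out with
  | nil => simp
  | cons v vs ih =>
    rw [List.foldl_cons]
    show vs.foldl _ (if (v.toList.foldl stepB (out, [], [])).2.1 ≠ [] then
        (v.toList.foldl stepB (out, [], [])).1 ++ [String.ofList (v.toList.foldl stepB (out, [], [])).2.1]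
      else (v.toList.foldl stepB (out, [], [])).1) = _
    rw [foldl_eq_scanGo, scanGo_item, ih]
    simp

theorem pvPiece_ofList (seg : List Char) :
    pvPiece (String.ofList seg) = pieceSeg seg := by
  simp only [pvPiece, pieceSeg, PySem.Str.strip]
  by_cases hs : PySem.Chars.strip seg = [] <;> simp [hs]

-- ===== VERDICT (by name: the statement is the Claim_ definition above) =====
theorem vary_values_py_spec : Claim_equal_vary_values_py := by
  intro values _
  show vary_values_py values = vary_values_py_alt values
  have hA : vary_values_py values = (values.flatMap strSplit).filterMap pvPiece := by
    unfold vary_values_py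
    exact outer_loop_eq values []
  have hB : vary_values_py_alt values = [] ++ values.flatMap perItem := altB values []
  rw [hA, hB, List.nil_append, List.filterMap_flatMap]
  congr 1
  funext item
  rw [strSplit_eq, List.filterMap_map, perItem]
  congr 1
  funext seg
  exact pvPiece_ofList seg
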